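-- pv_equiv track=rewrite | github.com/Chlafen/taquin-game | taquin.py | board_solution
-- ===== SOURCE A (Python) =====
-- def board_solution(size):
--     sol = []
--     for i in range(0, size):
--         row = []
--         for j in range(0, size):
--             row.append(i * size + j)
--         sol.append(row)
--     return sol
-- ===== SOURCE B (Python) =====
-- def board_solution(size):
--     n = max(size, 0)
--     flat = range(n * n)
--     return [list(flat[i * n:(i + 1) * n]) for i in range(n)]
-- ===== Notes on version B (the rewrite author's own statement) =====
-- stated objective: alternative
-- what changed: B forms the whole flat sequence range(n*n) once and reshapes it into rows by slicing it in chunks of n, instead of recomputing i*size+j cell by cell in nested append loops.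
import Mathlib
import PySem

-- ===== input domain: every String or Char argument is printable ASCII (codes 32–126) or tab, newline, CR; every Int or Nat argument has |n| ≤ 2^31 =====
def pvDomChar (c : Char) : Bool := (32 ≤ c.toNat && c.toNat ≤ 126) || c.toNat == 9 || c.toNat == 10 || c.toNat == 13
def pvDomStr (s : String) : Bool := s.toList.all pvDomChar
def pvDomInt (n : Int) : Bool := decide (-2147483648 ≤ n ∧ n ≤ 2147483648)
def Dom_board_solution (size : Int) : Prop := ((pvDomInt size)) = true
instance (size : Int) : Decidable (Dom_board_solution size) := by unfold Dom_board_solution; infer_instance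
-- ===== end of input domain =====

-- B builds the flat sequence list(range(size*size)) once and reshapes it into rows by slicing (alternative decomposition, same cost).


-- ===== PORT A =====
def board_solution (size : Int) : List (List Int) :=
  (PySem.List.pyRange 0 size 1).foldl
    (fun sol i =>
      sol ++ [(PySem.List.pyRange 0 size 1).foldl (fun row j => row ++ [i * size + j]) []])
    []

-- ===== PORT B =====
def board_solution_alt (size : Int) : List (List Int) :=
  let n := max size 0
  let flat := PySem.List.pyRange 0 (n * n) 1
  (PySem.List.pyRange 0 n 1).map
    (fun i => PySem.List.slice flat (some (i * n)) (some ((i + 1) * n)))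

-- ===== PRECONDITION & SPEC =====
def Spec_board_solution (size : Int) (out : List (List Int)) : Prop := out = board_solution_alt size
instance (size : Int) (out : List (List Int)) : Decidable (Spec_board_solution size out) := by unfold Spec_board_solution; infer_instance

-- ===== CLAIM (what is proved, stated in full; the proofs are below) =====
def Claim_equal_board_solution : Prop := ∀ (size : Int), Dom_board_solution size → Spec_board_solution size (board_solution size)

-- ===== LEMMAS AND PROOFS =====

-- a row of B: the slice of the flat range is exactly the row A builds
theorem pv_row_eq (size i : Int) (h0 : 0 ≤ i) (h1 : i < size) :
    PySem.List.slice (PySem.List.pyRange 0 (size * size) 1)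
      (some (i * size)) (some ((i + 1) * size)) =
    (PySem.List.pyRange 0 size 1).map (fun j => i * size + j) := by
  have hsz : 0 < size := lt_of_le_of_lt h0 h1
  have ha : (0:Int) ≤ i * size := mul_nonneg h0 (le_of_lt hsz)
  have hb : (0:Int) ≤ (i + 1) * size := mul_nonneg (by omega) (le_of_lt hsz)
  rw [PySem.List.slice_toNat _ ha hb]
  have hA : i * size + size = (i + 1) * size := by ring
  have hB : (i + 1) * size ≤ size * size := by nlinarith
  apply List.ext_getElem
  · simp [PySem.List.length_pyRange_one]
    omega
  · intro k hk hk'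
    have hk2 : k < (size * size).toNat - (i * size).toNat := by
      simp [PySem.List.length_pyRange_one] at hk
      omega
    have hlen : k < ((PySem.List.pyRange 0 (size * size) 1).drop (i * size).toNat).length := by
      simp [PySem.List.length_pyRange_one]
      omega
    rw [List.getElem_take, List.getElem_drop]
    have hmem : (i * size).toNat + k < (PySem.List.pyRange 0 (size * size) 1).length := by
      simp [PySem.List.length_pyRange_one]; omega
    rw [PySem.List.getElem_pyRange_one]
    simp only [List.getElem_map]
    rw [PySem.List.getElem_pyRange_one]
    omega

-- ===== VERDICT (by name: the statement is the Claim_ definition above) =====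
theorem board_solution_spec : Claim_equal_board_solution := by
  intro size _
  unfold Spec_board_solution board_solution board_solution_alt
  by_cases h : 0 < size
  · have hmax : max size 0 = size := by omega
    simp only [hmax]
    rw [PySem.List.foldl_append_singleton_eq_map, List.nil_append]
    refine (List.map_congr_left (fun i hi => ?_)).symm
    rw [PySem.List.foldl_append_singleton_eq_map, List.nil_append]
    have := (PySem.List.mem_pyRange_one).1 hi
    exact pv_row_eq size i (by omega) (by omega)
  · have hmax : max size 0 = 0 := by omega
    simp only [hmax]
    rw [PySem.List.pyRange_one_eq_nil (by omega), PySem.List.pyRange_one_eq_nil (by omega)]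
    rfl
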